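-- pv_equiv track=rewrite | github.com/PatrickKalkman/advent2023 | 9/main-day9-2.py | calculate_history
-- ===== SOURCE A (Python) =====
-- def calculate_history(number_line):
--     history = [number_line]
--
--     while True:
--         current_sequence = history[-1]
--         next_sequence = [current_sequence[i + 1] - current_sequence[i] for i in range(len(current_sequence) - 1)]
--
--         history.append(next_sequence)
--
--         # Check if all elements in the next sequence are zero
--         if all(x == 0 for x in next_sequence):
--             break
--
--     return history
-- ===== SOURCE B (Python) =====
-- def calculate_history(number_line):
--     diffs = [number_line[i + 1] - number_line[i] for i in range(len(number_line) - 1)]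
--     if all(x == 0 for x in diffs):
--         return [number_line, diffs]
--     return [number_line] + calculate_history(diffs)
-- ===== Notes on version B (the rewrite author's own statement) =====
-- stated objective: simpler
-- what changed: Replaces the while-True loop with an explicit history accumulator by direct recursion on the difference sequence, prepending each row and returning both final rows in the base case.
import Mathlib
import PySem

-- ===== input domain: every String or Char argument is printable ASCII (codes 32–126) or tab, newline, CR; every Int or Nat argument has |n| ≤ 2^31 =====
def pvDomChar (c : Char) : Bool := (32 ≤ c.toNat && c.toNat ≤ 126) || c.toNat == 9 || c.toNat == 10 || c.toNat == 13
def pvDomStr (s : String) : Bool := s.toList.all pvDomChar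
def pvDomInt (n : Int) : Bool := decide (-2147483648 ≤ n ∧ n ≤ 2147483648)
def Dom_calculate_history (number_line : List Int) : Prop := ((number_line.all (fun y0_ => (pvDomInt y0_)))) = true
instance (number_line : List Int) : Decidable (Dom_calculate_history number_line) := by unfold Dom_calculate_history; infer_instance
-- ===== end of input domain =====

-- B replaces A's while-True loop with an explicit history accumulator by direct
-- recursion on the difference sequence (objective: simpler); same return value.

-- ===== PORT A =====
-- the comprehension [cur[i+1] - cur[i] for i in range(len(cur)-1)], shared by both
-- sources verbatim; every index is in range, so getD is exact here
def pvDiffs (cur : List Int) : List Int :=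
  (List.range (cur.length - 1)).map (fun i => cur.getD (i + 1) 0 - cur.getD i 0)

-- termination fact for both recursions: a not-all-zero next sequence is strictly shorter
theorem pvDiffs_lt (c : List Int) (h : ¬ (pvDiffs c).all (fun x => x == 0)) :
    (pvDiffs c).length < c.length := by
  have hlen : (pvDiffs c).length = c.length - 1 := by simp [pvDiffs]
  cases c with
  | nil => exact absurd (by simp [pvDiffs]) h
  | cons a t => simp [hlen]

-- A's while-True loop; `current` carries the value of history[-1] (always the row
-- just appended), so reading history[-1] yields the same value
def pvLoopA (history : List (List Int)) (current : List Int) : List (List Int) :=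
  let next := pvDiffs current
  if next.all (fun x => x == 0) then history ++ [next]
  else pvLoopA (history ++ [next]) next
termination_by current.length
decreasing_by exact pvDiffs_lt current (by assumption)

def calculate_history (number_line : List Int) : List (List Int) :=
  pvLoopA [number_line] number_line

-- ===== PORT B =====
def calculate_history_alt (number_line : List Int) : List (List Int) :=
  let diffs := pvDiffs number_line
  if diffs.all (fun x => x == 0) then [number_line, diffs]
  else number_line :: calculate_history_alt diffs
termination_by number_line.length
decreasing_by exact pvDiffs_lt number_line (by assumption)

-- ===== PRECONDITION & SPEC =====
def Spec_calculate_history (number_line : List Int) (out : List (List Int)) : Prop := out = calculate_history_alt number_line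
instance (number_line : List Int) (out : List (List Int)) : Decidable (Spec_calculate_history number_line out) := by unfold Spec_calculate_history; infer_instance

-- ===== CLAIM (what is proved, stated in full; the proofs are below) =====
def Claim_equal_calculate_history : Prop := ∀ (number_line : List Int), Dom_calculate_history number_line → Spec_calculate_history number_line (calculate_history number_line)

-- ===== LEMMAS AND PROOFS =====
theorem alt_base (c : List Int) (h : ((pvDiffs c).all fun x => x == 0) = true) :
    calculate_history_alt c = [c, pvDiffs c] := by
  rw [calculate_history_alt]; simp only [h, if_pos]

theorem alt_step (c : List Int) (h : ¬ ((pvDiffs c).all fun x => x == 0) = true) :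
    calculate_history_alt c = c :: calculate_history_alt (pvDiffs c) := by
  rw [calculate_history_alt]; simp [h]

-- B's result always starts with its argument
theorem alt_cons (c : List Int) :
    calculate_history_alt c = c :: (calculate_history_alt c).tail := by
  by_cases h : ((pvDiffs c).all fun x => x == 0) = true
  · rw [alt_base c h]; rfl
  · rw [alt_step c h]; rfl

-- loop invariant: A's loop appends exactly the rows B produces below `current`
theorem loopA_eq (history : List (List Int)) (current : List Int) :
    pvLoopA history current = history ++ (calculate_history_alt current).tail := by
  fun_induction pvLoopA history current with
  | case1 h c next hz => rw [alt_base c hz]; rfl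
  | case2 h c next hz ih =>
      rw [ih, alt_step c hz]
      simp only [List.tail_cons, List.append_assoc, List.singleton_append]
      rw [← alt_cons next]

-- ===== VERDICT (by name: the statement is the Claim_ definition above) =====
theorem calculate_history_spec : Claim_equal_calculate_history := by
  intro nl _
  unfold Spec_calculate_history calculate_history
  rw [loopA_eq, List.singleton_append, ← alt_cons nl]
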